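-- pv_equiv track=rewrite | github.com/ksomemo/Competitive-programming | atcoder/abc/099/C.py | search_heap
-- ===== SOURCE A (Python) =====
-- import heapq
--
-- def search_heap(N):
--     """
--     これもDijkstra
--         というより、priority_queue を使うらしい
--     https://twitter.com/_TTJR_/status/1005806878788472833
--         合計を頂点、6^k ・ 9^k 足すのを辺とみなして最短路
--     https://beta.atcoder.jp/contests/abc099/submissions/2649257
--     https://docs.python.jp/3/library/heapq.html
--     """
--     costs = [N] * (N+1)
--     costs[0] = 0
--     q = []
--     heapq.heappush(q, 0)
--
--     # ここから
--     while q: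
--         e = heapq.heappop(q)
--
--         w = 1
--         while e + w <= N:
--             if costs[e + w] > costs[e] + 1:
--                 costs[e + w] = costs[e] + 1
--                 heapq.heappush(q, e + w)
--             w *= 6
--
--         w = 9
--         while e + w <= N:
--             if costs[e + w] > costs[e] + 1:
--                 costs[e + w] = costs[e] + 1
--                 heapq.heappush(q, e + w)
--             w *= 9
--
--     return costs[N]
--
--     # TODO: 下記の意味は？
--     ans = N
--     for i in range(N+1):
--         ans = min(ans, costs[i] + (N - i))
--
--     return ans
-- ===== SOURCE B (Python) =====
-- def search_heap(N):
--     # forward DP: dp[i] = 1 + min dp[i-w] over powers w of 6 (incl. 1) and 9 with w <= i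
--     dp = [0]
--     for i in range(1, N + 1):
--         best = dp[i - 1]
--         w = 6
--         while w <= i:
--             best = min(best, dp[i - w])
--             w *= 6
--         w = 9
--         while w <= i:
--             best = min(best, dp[i - w])
--             w *= 9
--         dp.append(best + 1)
--     return dp[N]
-- ===== Notes on version B (the rewrite author's own statement) =====
-- stated objective: alternative
-- what changed: Replaced the heap-based label-correcting shortest-path search over an N+1 costs array by a single left-to-right DP pass where dp[i] = 1 + min(dp[i-w]) over powers of 6 and 9, removing the worklist/heap entirely.
-- outside the precondition, e.g. on search_heap(-1): A raises IndexError, B returns 0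
import Mathlib
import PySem

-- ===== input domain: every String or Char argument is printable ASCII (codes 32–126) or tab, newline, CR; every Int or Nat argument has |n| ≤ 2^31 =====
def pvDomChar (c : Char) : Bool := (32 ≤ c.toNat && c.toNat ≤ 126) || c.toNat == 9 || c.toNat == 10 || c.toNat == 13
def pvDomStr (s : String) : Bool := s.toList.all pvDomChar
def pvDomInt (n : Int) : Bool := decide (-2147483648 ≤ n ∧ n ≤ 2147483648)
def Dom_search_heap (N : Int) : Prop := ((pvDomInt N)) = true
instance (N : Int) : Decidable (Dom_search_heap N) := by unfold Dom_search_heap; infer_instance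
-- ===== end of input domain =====

-- B replaces A's heap-based label-correcting shortest-path search by a single
-- left-to-right DP pass (dp[i] = 1 + min dp[i-w] over powers of 6 and 9); equal
-- return value on every N ≥ 0 (A raises IndexError for N < 0, excluded by Pre_).

-- ===== PORT A =====
-- heapq's priority queue of ints, modelled as a skew heap (node = one stored int;
-- heappush = merge with a singleton, heappop = take the root and merge the children).
inductive PQ where
  | leaf : PQ
  | node : Nat → PQ → PQ → PQ

-- skew-heap merge; the fuel only makes the recursion structural (one root is consumed
-- per step, so any fuel > total number of stored elements suffices; callers supply that)
def pqMerge : Nat → PQ → PQ → PQ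
  | 0, a, _ => a
  | _ + 1, PQ.leaf, b => b
  | _ + 1, a, PQ.leaf => a
  | f + 1, PQ.node x l r, PQ.node y l' r' =>
    if x ≤ y then PQ.node x (pqMerge f (PQ.node y l' r') r) l
    else PQ.node y (pqMerge f (PQ.node x l r) r') l'

-- inner `w = <start>; while e + w <= N: ... w *= mul` relaxation loop of A (mul = 6 resp. 9);
-- state: the costs array, the heap q, and cnt = number of ints stored in q.
-- The fuel argument only makes the recursion structural; w grows strictly, so n + 1 suffices.
def relaxA (n e mul : Nat) : Nat → Nat → Array Nat → PQ → Nat → Array Nat × PQ × Nat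
  | 0, _, costs, q, cnt => (costs, q, cnt)
  | fuel + 1, w, costs, q, cnt =>
    if e + w ≤ n then
      if costs.getD (e + w) 0 > costs.getD e 0 + 1 then
        relaxA n e mul fuel (w * mul) (costs.setIfInBounds (e + w) (costs.getD e 0 + 1))
          (pqMerge (cnt + 2) q (PQ.node (e + w) PQ.leaf PQ.leaf)) (cnt + 1)
      else relaxA n e mul fuel (w * mul) costs q cnt
    else (costs, q, cnt)

-- one iteration of the `while q` body after the heappop: the two inner relaxation loops
def stepA (n e : Nat) (costs : Array Nat) (q : PQ) (cnt : Nat) : Array Nat × PQ × Nat :=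
  match relaxA n e 6 (n + 1) 1 costs q cnt with
  | (c2, q2, cnt2) => relaxA n e 9 (n + 1) 9 c2 q2 cnt2

-- `while q: e = heappop(q); <relax with powers of 6 from 1>; <relax with powers of 9 from 9>`
-- (fuel: each iteration pops one int and each push strictly decreases one costs entry,
-- so 2 * sum(costs) + cnt + 1 units are enough; the initial call supplies 2*n*n + 2)
def loopA (n : Nat) : Nat → Array Nat → PQ → Nat → Array Nat
  | 0, costs, _, _ => costs
  | fuel + 1, costs, q, cnt =>
    match q with
    | PQ.leaf => costs
    | PQ.node e l r =>
      match stepA n e costs (pqMerge (cnt + 1) l r) (cnt - 1) with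
      | (c2, q2, cnt2) => loopA n fuel c2 q2 cnt2

-- costs = [N]*(N+1); costs[0] = 0; q = [0]; run the loop; return costs[N]
def search_heap (N : Int) : Int :=
  let n := N.toNat
  ((loopA n (2 * (n * n) + 2) ((Array.replicate (n + 1) n).setIfInBounds 0 0)
      (PQ.node 0 PQ.leaf PQ.leaf) 1).getD n 0 : Nat)

-- ===== PORT B =====
-- `w = mul; while w <= i: best = min(best, dp[i-w]); w *= mul`  (fuel as in relaxA: i + 1 suffices)
def minPowB (mul : Nat) : Nat → Nat → Nat → List Nat → Nat → Nat
  | 0, _, _, _, best => best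
  | fuel + 1, w, i, dp, best =>
    if w ≤ i then minPowB mul fuel (w * mul) i dp (min best (dp.getD (i - w) 0)) else best

-- body of the `for i in range(1, N+1)` loop: best over both power families, then dp.append(best + 1)
def stepB (dp : List Nat) (i : Nat) : List Nat :=
  dp ++ [minPowB 9 (i + 1) 9 i dp (minPowB 6 (i + 1) 6 i dp (dp.getD (i - 1) 0)) + 1]

def search_heap_alt (N : Int) : Int :=
  let n := N.toNat
  (((List.range' 1 n).foldl stepB [0]).getD n 0 : Nat)

-- ===== PRECONDITION & SPEC =====
-- Pre_ excludes exactly N < 0, where Python A raises IndexError (costs[0] on an empty list).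
def Pre_search_heap (N : Int) : Prop := 0 ≤ N
instance (N : Int) : Decidable (Pre_search_heap N) := by unfold Pre_search_heap; infer_instance
def pvWitness_search_heap : Int := (12)

def Spec_search_heap (N : Int) (out : Int) : Prop := out = search_heap_alt N
instance (N : Int) (out : Int) : Decidable (Spec_search_heap N out) := by unfold Spec_search_heap; infer_instance

-- ===== CLAIM (what is proved, stated in full; the proofs are below) =====
def Claim_equal_search_heap : Prop := ∀ (N : Int), Dom_search_heap N → Pre_search_heap N → Spec_search_heap N (search_heap N)

-- ===== LEMMAS AND PROOFS =====

-- the graph: vertices 0..n, a weight-1 edge from u to u+w for w a power of 6 (incl. 1) or of 9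
def IsEdge (w : Nat) : Prop := (∃ k, w = 6 ^ k) ∨ (∃ k, w = 9 ^ (k + 1))

-- Reach k v: v is the sum of exactly k terms, each a power of 6 or of 9
inductive Reach : Nat → Nat → Prop
  | zero : Reach 0 0
  | step {w k u : Nat} : IsEdge w → Reach k u → Reach (k + 1) (u + w)

def MinD (v c : Nat) : Prop := Reach c v ∧ ∀ k, Reach k v → c ≤ k

theorem edge_pos {w : Nat} (h : IsEdge w) : 1 ≤ w := by
  rcases h with ⟨k, rfl⟩ | ⟨k, rfl⟩ <;> exact Nat.one_le_pow _ _ (by omega)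

theorem reach_self (n : Nat) : Reach n n := by
  induction n with
  | zero => exact Reach.zero
  | succ m ih => exact Reach.step (Or.inl ⟨0, rfl⟩) ih

theorem minD_unique {v a b : Nat} (ha : MinD v a) (hb : MinD v b) : a = b :=
  Nat.le_antisymm (ha.2 b hb.1) (hb.2 a ha.1)

theorem reach_inv {k v : Nat} (h : Reach k v) :
    (k = 0 ∧ v = 0) ∨ ∃ w j u, IsEdge w ∧ k = j + 1 ∧ v = u + w ∧ Reach j u := by
  cases h with
  | zero => exact Or.inl ⟨rfl, rfl⟩
  | step hw hr => exact Or.inr ⟨_, _, _, hw, rfl, rfl, hr⟩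

-- the ints stored in a heap, and the two facts used about merging

def pqElems : PQ → List Nat
  | PQ.leaf => []
  | PQ.node x l r => x :: (pqElems l ++ pqElems r)

theorem pqMerge_mem (f : Nat) (a b : PQ)
    (hf : (pqElems a).length + (pqElems b).length < f) (x : Nat) :
    x ∈ pqElems (pqMerge f a b) ↔ x ∈ pqElems a ∨ x ∈ pqElems b := by
  induction f generalizing a b with
  | zero => omega
  | succ f ih =>
    match a, b with
    | PQ.leaf, b => simp [pqMerge, pqElems]
    | PQ.node x' l r, PQ.leaf => simp [pqMerge, pqElems]
    | PQ.node x' l r, PQ.node y' l' r' =>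
      simp only [pqElems, List.length_cons, List.length_append] at hf
      simp only [pqMerge]
      split
      · simp only [pqElems, List.mem_cons, List.mem_append,
          ih (PQ.node y' l' r') r (by simp [pqElems]; omega)]
        tauto
      · simp only [pqElems, List.mem_cons, List.mem_append,
          ih (PQ.node x' l r) r' (by simp [pqElems]; omega)]
        tauto

theorem pqMerge_length (f : Nat) (a b : PQ)
    (hf : (pqElems a).length + (pqElems b).length < f) :
    (pqElems (pqMerge f a b)).length = (pqElems a).length + (pqElems b).length := by
  induction f generalizing a b with
  | zero => omega
  | succ f ih =>
    match a, b with
    | PQ.leaf, b => simp [pqMerge, pqElems]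
    | PQ.node x' l r, PQ.leaf => simp [pqMerge, pqElems]
    | PQ.node x' l r, PQ.node y' l' r' =>
      simp only [pqElems, List.length_cons, List.length_append] at hf
      simp only [pqMerge]
      split
      · simp only [pqElems, List.length_cons, List.length_append,
          ih (PQ.node y' l' r') r (by simp [pqElems]; omega)]
        omega
      · simp only [pqElems, List.length_cons, List.length_append,
          ih (PQ.node x' l r) r' (by simp [pqElems]; omega)]
        omega

-- array access under setIfInBounds, and the sum bookkeeping used by the measure

theorem agetD_set_eq (a : Array Nat) (i v : Nat) (hi : i < a.size) :
    (a.setIfInBounds i v).getD i 0 = v := by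
  simp [Array.getD_eq_getD_getElem?, hi]

theorem agetD_set_ne (a : Array Nat) (i j v : Nat) (h : i ≠ j) :
    (a.setIfInBounds i v).getD j 0 = a.getD j 0 := by
  simp [Array.getD_eq_getD_getElem?, h]

theorem sum_set_add (l : List Nat) (i a : Nat) (h : i < l.length) :
    (l.set i a).sum + l.getD i 0 = l.sum + a := by
  induction l generalizing i with
  | nil => simp at h
  | cons x xs ih =>
    cases i with
    | zero => simp [List.getD]; omega
    | succ j =>
      have hj : j < xs.length := by simpa using h
      have := ih j hj
      simp only [List.set, List.sum_cons, List.getD_cons_succ]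
      omega

theorem agetD_toList (a : Array Nat) (i : Nat) : a.toList.getD i 0 = a.getD i 0 := by
  simp [List.getD, Array.getD_eq_getD_getElem?]

theorem asum_set_add (a : Array Nat) (i v : Nat) (h : i < a.size) :
    (a.setIfInBounds i v).toList.sum + a.getD i 0 = a.toList.sum + v := by
  rw [Array.toList_setIfInBounds, ← agetD_toList]
  exact sum_set_add a.toList i v (by simpa using h)

theorem relaxA_size (n e mul fuel w : Nat) (costs : Array Nat) (q : PQ) (cnt : Nat) :
    (relaxA n e mul fuel w costs q cnt).1.size = costs.size := by
  induction fuel generalizing w costs q cnt with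
  | zero => rfl
  | succ f ih =>
    simp only [relaxA]
    split
    · split
      · rw [ih]; simp
      · exact ih _ _ _ _
    · rfl

theorem relaxA_cnt (n e mul fuel w : Nat) (costs : Array Nat) (q : PQ) (cnt : Nat)
    (hcnt : cnt = (pqElems q).length) :
    (relaxA n e mul fuel w costs q cnt).2.2
      = (pqElems (relaxA n e mul fuel w costs q cnt).2.1).length := by
  revert hcnt
  induction fuel generalizing w costs q cnt with
  | zero => intro h; exact h
  | succ f ih =>
    intro hcnt
    simp only [relaxA]
    split
    · split
      · refine ih _ _ _ _ ?_
        rw [pqMerge_length _ _ _ (by simp [pqElems]; omega)]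
        simp [pqElems]; omega
      · exact ih _ _ _ _ hcnt
    · exact hcnt

theorem relaxA_measure (n e mul fuel w : Nat) (costs : Array Nat) (q : PQ) (cnt : Nat)
    (hlen : costs.size = n + 1) (hcnt : cnt = (pqElems q).length) :
    2 * (relaxA n e mul fuel w costs q cnt).1.toList.sum
        + (relaxA n e mul fuel w costs q cnt).2.2
      ≤ 2 * costs.toList.sum + cnt := by
  revert hlen hcnt
  induction fuel generalizing w costs q cnt with
  | zero => intro _ _; exact le_rfl
  | succ f ih =>
    intro hlen hcnt
    simp only [relaxA]
    split
    · rename_i h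
      split
      · rename_i hgt
        have hib : e + w < costs.size := by omega
        have hs := asum_set_add costs (e + w) (costs.getD e 0 + 1) hib
        have hrec := ih (w * mul) (costs.setIfInBounds (e + w) (costs.getD e 0 + 1))
          (pqMerge (cnt + 2) q (PQ.node (e + w) PQ.leaf PQ.leaf)) (cnt + 1)
          (by simpa using hlen)
          (by rw [pqMerge_length _ _ _ (by simp [pqElems]; omega)]; simp [pqElems]; omega)
        omega
      · exact ih _ _ _ _ hlen hcnt
    · exact le_rfl

theorem relaxA_mono (n e mul fuel w : Nat) (costs : Array Nat) (q : PQ) (cnt : Nat) (v : Nat) :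
    (relaxA n e mul fuel w costs q cnt).1.getD v 0 ≤ costs.getD v 0 := by
  induction fuel generalizing w costs q cnt with
  | zero => exact le_rfl
  | succ f ih =>
    simp only [relaxA]
    split
    · rename_i h
      split
      · rename_i hgt
        refine le_trans (ih _ _ _ _) ?_
        by_cases hb : e + w < costs.size
        · by_cases hv : e + w = v
          · subst hv; rw [agetD_set_eq _ _ _ hb]; omega
          · rw [agetD_set_ne _ _ _ _ hv]
        · have : (costs.setIfInBounds (e + w) (costs.getD e 0 + 1)).getD v 0 = costs.getD v 0 := by
            by_cases hv : e + w = v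
            · subst hv
              simp [Array.getD_eq_getD_getElem?, hb]
            · exact agetD_set_ne _ _ _ _ hv
          rw [this]
      · exact ih _ _ _ _
    · exact le_rfl

theorem relaxA_lt_unchanged (n e mul fuel w : Nat) (hm : 2 ≤ mul) (hw : 1 ≤ w)
    (costs : Array Nat) (q : PQ) (cnt : Nat) (v : Nat) (hv : v < e + w) :
    (relaxA n e mul fuel w costs q cnt).1.getD v 0 = costs.getD v 0 := by
  revert hw hv
  induction fuel generalizing w costs q cnt with
  | zero => intro _ _; rfl
  | succ f ih =>
    intro hw hv
    have hmul : w + 1 ≤ w * mul := by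
      calc w + 1 ≤ w + w := by omega
        _ = w * 2 := by ring
        _ ≤ w * mul := Nat.mul_le_mul_left w hm
    simp only [relaxA]
    split
    · rename_i h
      split
      · rename_i hgt
        rw [ih _ _ _ _ (by omega) (by omega)]
        exact agetD_set_ne _ _ _ _ (by omega)
      · exact ih _ _ _ _ (by omega) (by omega)
    · rfl

theorem relaxA_q_sub (n e mul fuel w : Nat) (costs : Array Nat) (q : PQ) (cnt : Nat)
    (hcnt : cnt = (pqElems q).length) (x : Nat) (hx : x ∈ pqElems q) :
    x ∈ pqElems (relaxA n e mul fuel w costs q cnt).2.1 := by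
  revert hcnt hx
  induction fuel generalizing w costs q cnt with
  | zero => intro _ hx; exact hx
  | succ f ih =>
    intro hcnt hx
    simp only [relaxA]
    split
    · split
      · refine ih _ _ _ _ ?_ ?_
        · rw [pqMerge_length _ _ _ (by simp [pqElems]; omega)]
          simp [pqElems]; omega
        · rw [pqMerge_mem _ _ _ (by simp [pqElems]; omega)]
          exact Or.inl hx
      · exact ih _ _ _ _ hcnt hx
    · exact hx

theorem relaxA_q_new (n e mul fuel w : Nat) (costs : Array Nat) (q : PQ) (cnt : Nat)
    (hcnt : cnt = (pqElems q).length) (x : Nat)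
    (hx : x ∈ pqElems (relaxA n e mul fuel w costs q cnt).2.1) :
    x ∈ pqElems q ∨ x ≤ n := by
  revert hcnt hx
  induction fuel generalizing w costs q cnt with
  | zero => intro _ hx; exact Or.inl hx
  | succ f ih =>
    intro hcnt
    simp only [relaxA]
    split
    · rename_i h
      split
      · intro hx
        rcases ih (w * mul) _ _ (cnt + 1)
            (by rw [pqMerge_length _ _ _ (by simp [pqElems]; omega)]; simp [pqElems]; omega)
            hx with hm' | hn
        · rw [pqMerge_mem _ _ _ (by simp [pqElems]; omega)] at hm'
          rcases hm' with h1 | h1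
          · exact Or.inl h1
          · simp [pqElems] at h1; omega
        · exact Or.inr hn
      · exact ih _ _ _ _ hcnt
    · intro hx; exact Or.inl hx

theorem relaxA_changed_mem (n e mul fuel w : Nat) (costs : Array Nat) (q : PQ) (cnt : Nat)
    (hcnt : cnt = (pqElems q).length) (v : Nat)
    (h : (relaxA n e mul fuel w costs q cnt).1.getD v 0 ≠ costs.getD v 0) :
    v ∈ pqElems (relaxA n e mul fuel w costs q cnt).2.1 := by
  revert hcnt h
  induction fuel generalizing w costs q cnt with
  | zero => intro _ h; exact absurd rfl h
  | succ f ih =>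
    intro hcnt
    simp only [relaxA]
    split
    · rename_i h
      split
      · rename_i hgt
        intro hch
        have hcnt' : cnt + 1
            = (pqElems (pqMerge (cnt + 2) q (PQ.node (e + w) PQ.leaf PQ.leaf))).length := by
          rw [pqMerge_length _ _ _ (by simp [pqElems]; omega)]
          simp [pqElems]; omega
        by_cases hsame :
            (relaxA n e mul f (w * mul)
                (costs.setIfInBounds (e + w) (costs.getD e 0 + 1))
                (pqMerge (cnt + 2) q (PQ.node (e + w) PQ.leaf PQ.leaf)) (cnt + 1)).1.getD v 0
              = (costs.setIfInBounds (e + w) (costs.getD e 0 + 1)).getD v 0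
        · have hv : v = e + w := by
            by_contra hne
            rw [hsame, agetD_set_ne _ _ _ _ (fun hh => hne hh.symm)] at hch
            exact hch rfl
          subst hv
          refine relaxA_q_sub _ _ _ _ _ _ _ _ hcnt' _ ?_
          rw [pqMerge_mem _ _ _ (by simp [pqElems]; omega)]
          exact Or.inr (by simp [pqElems])
        · exact ih _ _ _ _ hcnt' hsame
      · exact ih _ _ _ _ hcnt
    · intro hch; exact absurd rfl hch

theorem relaxA_establish (n e mul fuel w : Nat) (hm : 2 ≤ mul) (hw : 1 ≤ w)
    (costs : Array Nat) (q : PQ) (cnt : Nat) (hlen : costs.size = n + 1)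
    (hf : n + 1 ≤ fuel + e + w) (k : Nat) (hk : e + w * mul ^ k ≤ n) :
    (relaxA n e mul fuel w costs q cnt).1.getD (e + w * mul ^ k) 0 ≤ costs.getD e 0 + 1 := by
  revert hw hlen hf k
  induction fuel generalizing w costs q cnt with
  | zero =>
    intro hw hlen hf k hk
    have h1 : 1 ≤ mul ^ k := Nat.one_le_pow _ _ (by omega)
    have h2 : w ≤ w * mul ^ k := Nat.le_mul_of_pos_right w (by omega)
    omega
  | succ f ih =>
    intro hw hlen hf k hk
    have hmul : w + 1 ≤ w * mul := by
      calc w + 1 ≤ w + w := by omega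
        _ = w * 2 := by ring
        _ ≤ w * mul := Nat.mul_le_mul_left w hm
    simp only [relaxA]
    split
    · rename_i h
      split
      · rename_i hgt
        cases k with
        | zero =>
          simp only [pow_zero, mul_one]
          calc (relaxA n e mul f (w * mul)
                  (costs.setIfInBounds (e + w) (costs.getD e 0 + 1))
                  (pqMerge (cnt + 2) q (PQ.node (e + w) PQ.leaf PQ.leaf)) (cnt + 1)).1.getD (e + w) 0
              ≤ (costs.setIfInBounds (e + w) (costs.getD e 0 + 1)).getD (e + w) 0 :=
                relaxA_mono _ _ _ _ _ _ _ _ _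
            _ = costs.getD e 0 + 1 := agetD_set_eq _ _ _ (by omega)
        | succ k =>
          have hrw : w * mul ^ (k + 1) = w * mul * mul ^ k := by ring
          have := ih (w * mul) (costs.setIfInBounds (e + w) (costs.getD e 0 + 1))
            (pqMerge (cnt + 2) q (PQ.node (e + w) PQ.leaf PQ.leaf)) (cnt + 1)
            (by omega) (by simpa using hlen) (by omega) k (by rw [← hrw]; exact hk)
          rw [agetD_set_ne _ _ _ _ (by omega)] at this
          rw [hrw]
          exact this
      · rename_i hgt
        cases k with
        | zero =>
          simp only [pow_zero, mul_one]
          calc (relaxA n e mul f (w * mul) costs q cnt).1.getD (e + w) 0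
              ≤ costs.getD (e + w) 0 := relaxA_mono _ _ _ _ _ _ _ _ _
            _ ≤ costs.getD e 0 + 1 := by omega
        | succ k =>
          have hrw : w * mul ^ (k + 1) = w * mul * mul ^ k := by ring
          rw [hrw]
          exact ih _ _ _ _ (by omega) hlen (by omega) k (by rw [← hrw]; exact hk)
    · rename_i h
      have h1 : 1 ≤ mul ^ k := Nat.one_le_pow _ _ (by omega)
      have h2 : w ≤ w * mul ^ k := Nat.le_mul_of_pos_right w (by omega)
      omega

theorem relaxA_reach (n e mul fuel w : Nat) (costs : Array Nat) (q : PQ) (cnt : Nat)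
    (hlen : costs.size = n + 1)
    (hedge : ∀ k, IsEdge (w * mul ^ k))
    (hub : ∀ v, v ≤ n → costs.getD v 0 ≤ n)
    (hR : ∀ v, v ≤ n → Reach (costs.getD v 0) v ∨ costs.getD v 0 = n)
    (v : Nat) (hv : v ≤ n) :
    Reach ((relaxA n e mul fuel w costs q cnt).1.getD v 0) v
      ∨ (relaxA n e mul fuel w costs q cnt).1.getD v 0 = n := by
  revert hlen hedge hub hR
  induction fuel generalizing w costs q cnt with
  | zero => intro _ _ _ hR; exact hR v hv
  | succ f ih =>
    intro hlen hedge hub hR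
    simp only [relaxA]
    split
    · rename_i h
      split
      · rename_i hgt
        have hubw : costs.getD (e + w) 0 ≤ n := hub _ h
        refine ih _ _ _ _ (by simpa using hlen) ?_ ?_ ?_
        · intro k
          have hrw : w * mul * mul ^ k = w * mul ^ (k + 1) := by ring
          rw [hrw]; exact hedge (k + 1)
        · intro u hu
          by_cases hvu : e + w = u
          · subst hvu; rw [agetD_set_eq _ _ _ (by omega)]; omega
          · rw [agetD_set_ne _ _ _ _ hvu]; exact hub _ hu
        · intro u hu
          by_cases hvu : e + w = u
          · subst hvu
            rw [agetD_set_eq _ _ _ (by omega)]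
            have he : e ≤ n := by omega
            rcases hR e he with hre | hre
            · left
              have hedge0 : IsEdge w := by have := hedge 0; simpa using this
              exact Reach.step hedge0 hre
            · omega
          · rw [agetD_set_ne _ _ _ _ hvu]; exact hR _ hu
      · refine ih _ _ _ _ hlen ?_ hub hR
        intro k
        have hrw : w * mul * mul ^ k = w * mul ^ (k + 1) := by ring
        rw [hrw]; exact hedge (k + 1)
    · exact hR v hv

theorem loopA_final (fuel n : Nat) (costs : Array Nat) (q : PQ) (cnt : Nat)
    (hlen : costs.size = n + 1)
    (hcnt : cnt = (pqElems q).length)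
    (hf : 2 * costs.toList.sum + cnt < fuel)
    (h0 : costs.getD 0 0 = 0)
    (hub : ∀ v, v ≤ n → costs.getD v 0 ≤ n)
    (hq : ∀ x ∈ pqElems q, x ≤ n)
    (hR : ∀ v, v ≤ n → Reach (costs.getD v 0) v ∨ costs.getD v 0 = n)
    (hJ5 : ∀ u, u ≤ n → u ∉ pqElems q → ∀ w, IsEdge w → u + w ≤ n →
      costs.getD (u + w) 0 ≤ costs.getD u 0 + 1) :
    ((loopA n fuel costs q cnt).getD 0 0 = 0) ∧
    (∀ v, v ≤ n → Reach ((loopA n fuel costs q cnt).getD v 0) v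
      ∨ (loopA n fuel costs q cnt).getD v 0 = n) ∧
    (∀ u w, IsEdge w → u + w ≤ n →
      (loopA n fuel costs q cnt).getD (u + w) 0 ≤ (loopA n fuel costs q cnt).getD u 0 + 1) := by
  revert hlen hcnt hf h0 hub hq hR hJ5
  induction fuel generalizing costs q cnt with
  | zero => intro _ _ hf; omega
  | succ f ih =>
    intro hlen hcnt hf h0 hub hq hR hJ5
    simp only [loopA]
    match hq0 : q with
    | PQ.leaf =>
      refine ⟨h0, hR, ?_⟩
      intro u w hw hn
      have h1 := edge_pos hw
      exact hJ5 u (by omega) (by simp [pqElems]) w hw hn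
    | PQ.node e l r =>
      have he : e ∈ pqElems (PQ.node e l r) := by simp [pqElems]
      have hen : e ≤ n := hq e he
      have hcnt0 : cnt = 1 + (pqElems l).length + (pqElems r).length := by
        rw [hcnt]; simp [pqElems]; omega
      -- the popped-state queue
      have hq1len : (pqElems (pqMerge (cnt + 1) l r)).length = cnt - 1 := by
        rw [pqMerge_length _ _ _ (by omega)]; omega
      have hq1mem : ∀ x, x ∈ pqElems (pqMerge (cnt + 1) l r)
          ↔ x ∈ pqElems l ∨ x ∈ pqElems r := fun x => pqMerge_mem _ _ _ (by omega) x
      simp only [stepA]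
      set q1 := pqMerge (cnt + 1) l r with hq1
      set c2 := (relaxA n e 6 (n + 1) 1 costs q1 (cnt - 1)).1 with hc2
      set q2 := (relaxA n e 6 (n + 1) 1 costs q1 (cnt - 1)).2.1 with hqq2
      set n2 := (relaxA n e 6 (n + 1) 1 costs q1 (cnt - 1)).2.2 with hn2
      set c3 := (relaxA n e 9 (n + 1) 9 c2 q2 n2).1 with hc3
      set q3 := (relaxA n e 9 (n + 1) 9 c2 q2 n2).2.1 with hqq3
      set n3 := (relaxA n e 9 (n + 1) 9 c2 q2 n2).2.2 with hn3
      have hl2 : c2.size = n + 1 := by rw [hc2, relaxA_size]; exact hlen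
      have hl3 : c3.size = n + 1 := by rw [hc3, relaxA_size]; exact hl2
      have hcnt1 : cnt - 1 = (pqElems q1).length := hq1len.symm
      have hcnt2 : n2 = (pqElems q2).length := by
        rw [hn2, hqq2]; exact relaxA_cnt _ _ _ _ _ _ _ _ hcnt1
      have hcnt3 : n3 = (pqElems q3).length := by
        rw [hn3, hqq3]; exact relaxA_cnt _ _ _ _ _ _ _ _ hcnt2
      have mono2 : ∀ v, c2.getD v 0 ≤ costs.getD v 0 := fun v => relaxA_mono _ _ _ _ _ _ _ _ v
      have mono3 : ∀ v, c3.getD v 0 ≤ c2.getD v 0 := fun v => relaxA_mono _ _ _ _ _ _ _ _ v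
      have un2 : ∀ v, v < e + 1 → c2.getD v 0 = costs.getD v 0 :=
        fun v hv => relaxA_lt_unchanged _ _ _ _ _ (by omega) (by omega) _ _ _ v hv
      have un3 : ∀ v, v < e + 9 → c3.getD v 0 = c2.getD v 0 :=
        fun v hv => relaxA_lt_unchanged _ _ _ _ _ (by omega) (by omega) _ _ _ v hv
      have hce3 : c3.getD e 0 = costs.getD e 0 := by
        rw [un3 e (by omega), un2 e (by omega)]
      -- fuel bound for the recursive call
      have hmeas : 2 * c3.toList.sum + n3 ≤ 2 * costs.toList.sum + (cnt - 1) := by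
        have hm1 := relaxA_measure n e 6 (n + 1) 1 costs q1 (cnt - 1) hlen hcnt1
        have hm2 := relaxA_measure n e 9 (n + 1) 9 c2 q2 n2 hl2 hcnt2
        rw [← hc2, ← hn2] at hm1
        rw [← hc3, ← hn3] at hm2
        omega
      -- invariants for the recursive call
      refine ih c3 q3 n3 hl3 hcnt3 (by omega) ?_ ?_ ?_ ?_ ?_
      · rw [un3 0 (by omega), un2 0 (by omega)]; exact h0
      · intro v hv; exact le_trans (mono3 v) (le_trans (mono2 v) (hub v hv))
      · intro x hx
        rcases relaxA_q_new _ _ _ _ _ _ _ _ hcnt2 x hx with hx2 | hxn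
        · rcases relaxA_q_new _ _ _ _ _ _ _ _ hcnt1 x hx2 with hxq | hxn
          · rcases (hq1mem x).1 hxq with h1 | h1
            · exact hq x (by simp [pqElems, h1])
            · exact hq x (by simp [pqElems, h1])
          · exact hxn
        · exact hxn
      · intro v hv
        refine relaxA_reach _ _ _ _ _ _ _ _ hl2 ?_ ?_ ?_ v hv
        · intro k; right; exact ⟨k, by ring⟩
        · intro u hu; exact le_trans (mono2 u) (hub u hu)
        · intro u hu
          refine relaxA_reach _ _ _ _ _ _ _ _ hlen ?_ hub hR u hu
          intro k; left; exact ⟨k, by simp⟩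
      · -- the relaxed-edges invariant for the new state
        intro u hu hnot w hw hn
        by_cases hue : u = e
        · subst hue
          rcases hw with ⟨k, rfl⟩ | ⟨k, rfl⟩
          · -- powers of 6: established by the first relax, preserved by the second
            have hest := relaxA_establish n u 6 (n + 1) 1 (by omega) (by omega)
              costs q1 (cnt - 1) hlen (by omega) k (by simpa using hn)
            simp only [one_mul] at hest
            rw [hce3]
            calc c3.getD (u + 6 ^ k) 0 ≤ c2.getD (u + 6 ^ k) 0 := mono3 _
              _ ≤ costs.getD u 0 + 1 := hest
          · -- powers of 9: established by the second relax
            have hest := relaxA_establish n u 9 (n + 1) 9 (by omega) (by omega) c2 q2 n2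
              hl2 (by omega) k (by rw [show (9 : Nat) * 9 ^ k = 9 ^ (k + 1) by ring]; exact hn)
            rw [show (9 : Nat) * 9 ^ k = 9 ^ (k + 1) by ring] at hest
            rw [hce3, ← un2 u (by omega)]
            exact hest
        · -- u was already settled and its cost did not change
          have hu2 : u ∉ pqElems q2 := fun hx =>
            hnot (relaxA_q_sub _ _ _ _ _ _ _ _ hcnt2 u hx)
          have huq1 : u ∉ pqElems q1 := fun hx =>
            hu2 (relaxA_q_sub _ _ _ _ _ _ _ _ hcnt1 u hx)
          have huq : u ∉ pqElems (PQ.node e l r) := by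
            intro hx
            simp only [pqElems, List.mem_cons, List.mem_append] at hx
            rcases hx with h1 | h1 | h1
            · exact hue h1
            · exact huq1 ((hq1mem u).2 (Or.inl h1))
            · exact huq1 ((hq1mem u).2 (Or.inr h1))
          have hck3 : c3.getD u 0 = c2.getD u 0 := by
            by_contra hne
            exact hnot (relaxA_changed_mem _ _ _ _ _ _ _ _ hcnt2 u hne)
          have hck2 : c2.getD u 0 = costs.getD u 0 := by
            by_contra hne
            exact hu2 (relaxA_changed_mem _ _ _ _ _ _ _ _ hcnt1 u hne)
          have hold := hJ5 u hu huq w hw hn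
          calc c3.getD (u + w) 0 ≤ costs.getD (u + w) 0 :=
                le_trans (mono3 _) (mono2 _)
            _ ≤ costs.getD u 0 + 1 := hold
            _ = c3.getD u 0 + 1 := by rw [hck3, hck2]

theorem final_upper (n : Nat) (c : Array Nat) (h0 : c.getD 0 0 = 0)
    (hJ5 : ∀ u w, IsEdge w → u + w ≤ n → c.getD (u + w) 0 ≤ c.getD u 0 + 1)
    {k v : Nat} (h : Reach k v) (hv : v ≤ n) : c.getD v 0 ≤ k := by
  induction h with
  | zero => omega
  | @step w j u hw hr ih =>
    have h1 := edge_pos hw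
    have hu : u ≤ n := by omega
    have := hJ5 u w hw hv
    have := ih hu
    omega

theorem init_getD (n v : Nat) (hv : v ≤ n) :
    ((Array.replicate (n + 1) n).setIfInBounds 0 0).getD v 0 = if v = 0 then 0 else n := by
  by_cases h : v = 0
  · subst h; rw [if_pos rfl]; exact agetD_set_eq _ _ _ (by simp)
  · rw [agetD_set_ne _ _ _ _ (fun hh => h hh.symm), if_neg h]
    simp [Array.getD_eq_getD_getElem?, Nat.lt_succ_of_le hv]

theorem init_sum (n : Nat) :
    ((Array.replicate (n + 1) n).setIfInBounds 0 0).toList.sum = n * n := by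
  have h := asum_set_add (Array.replicate (n + 1) n) 0 0 (by simp)
  have h1 : (Array.replicate (n + 1) n).getD 0 0 = n := by
    simp [Array.getD_eq_getD_getElem?]
  have h2 : (Array.replicate (n + 1) n).toList.sum = n * n + n := by
    simp [List.sum_replicate, smul_eq_mul]; ring
  rw [h1, h2] at h
  omega

theorem A_minD (n : Nat) :
    MinD n ((loopA n (2 * (n * n) + 2) ((Array.replicate (n + 1) n).setIfInBounds 0 0)
      (PQ.node 0 PQ.leaf PQ.leaf) 1).getD n 0) := by
  obtain ⟨f0, fR, fJ5⟩ :=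
    loopA_final (2 * (n * n) + 2) n ((Array.replicate (n + 1) n).setIfInBounds 0 0)
      (PQ.node 0 PQ.leaf PQ.leaf) 1 (by simp)
      (by simp [pqElems])
      (by rw [init_sum]; omega)
      (by rw [init_getD n 0 (by omega)]; simp)
      (fun v hv => by rw [init_getD n v hv]; split <;> omega)
      (fun x hx => by simp [pqElems] at hx; omega)
      (fun v hv => by
        rw [init_getD n v hv]
        split
        · subst_vars; exact Or.inl Reach.zero
        · exact Or.inr rfl)
      (fun u hu hnot w hw hn => by
        have h1 := edge_pos hw
        have hu0 : u ≠ 0 := by simpa [pqElems] using hnot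
        rw [init_getD n u hu, init_getD n (u + w) hn, if_neg hu0, if_neg (by omega)]
        omega)
  constructor
  · rcases fR n le_rfl with h | h
    · exact h
    · rw [h]; exact reach_self n
  · intro k hk
    exact final_upper n _ f0 fJ5 hk le_rfl

theorem minPowB_le_best (mul fuel w i : Nat) (dp : List Nat) (best : Nat) :
    minPowB mul fuel w i dp best ≤ best := by
  induction fuel generalizing w best with
  | zero => exact le_rfl
  | succ f ih =>
    simp only [minPowB]
    split
    · exact le_trans (ih _ _) (by omega)
    · exact le_rfl

theorem minPowB_le (mul fuel w i : Nat) (hm : 2 ≤ mul) (hw : 1 ≤ w) (hf : i < fuel + w)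
    (dp : List Nat) (best : Nat) (k : Nat) (hk : w * mul ^ k ≤ i) :
    minPowB mul fuel w i dp best ≤ dp.getD (i - w * mul ^ k) 0 := by
  revert hw hf k
  induction fuel generalizing w best with
  | zero =>
    intro hw hf k hk
    have h1 : 1 ≤ mul ^ k := Nat.one_le_pow _ _ (by omega)
    have h2 : w ≤ w * mul ^ k := Nat.le_mul_of_pos_right w (by omega)
    omega
  | succ f ih =>
    intro hw hf k hk
    have hmul : w + 1 ≤ w * mul := by
      calc w + 1 ≤ w + w := by omega
        _ = w * 2 := by ring
        _ ≤ w * mul := Nat.mul_le_mul_left w hm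
    simp only [minPowB]
    split
    · rename_i h
      cases k with
      | zero =>
        simp only [pow_zero, mul_one]
        exact le_trans (minPowB_le_best _ _ _ _ _ _) (by omega)
      | succ k =>
        have hrw : w * mul ^ (k + 1) = w * mul * mul ^ k := by ring
        rw [hrw]
        exact ih _ _ (by omega) (by omega) k (by rw [← hrw]; exact hk)
    · rename_i h
      have h1 : 1 ≤ mul ^ k := Nat.one_le_pow _ _ (by omega)
      have h2 : w ≤ w * mul ^ k := Nat.le_mul_of_pos_right w (by omega)
      omega

theorem minPowB_attain (mul fuel w i : Nat) (dp : List Nat) (best : Nat) :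
    minPowB mul fuel w i dp best = best ∨
      ∃ k, w * mul ^ k ≤ i ∧ minPowB mul fuel w i dp best = dp.getD (i - w * mul ^ k) 0 := by
  induction fuel generalizing w best with
  | zero => exact Or.inl rfl
  | succ f ih =>
    simp only [minPowB]
    split
    · rename_i h
      rcases ih (w * mul) (min best (dp.getD (i - w) 0)) with hb | ⟨k, hk, hv⟩
      · rcases le_total best (dp.getD (i - w) 0) with hmin | hmin
        · left; rw [hb]; exact Nat.min_eq_left hmin
        · right
          refine ⟨0, by simpa using h, ?_⟩
          rw [hb]
          simpa using Nat.min_eq_right hmin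
      · right
        refine ⟨k + 1, ?_, ?_⟩
        · rw [show w * mul ^ (k + 1) = w * mul * mul ^ k by ring]; exact hk
        · rw [show w * mul ^ (k + 1) = w * mul * mul ^ k by ring]; exact hv
    · exact Or.inl rfl

theorem stepB_minD (dp : List Nat) (i : Nat) (hi : 1 ≤ i) (hlen : dp.length = i)
    (hmd : ∀ v, v < i → MinD v (dp.getD v 0)) :
    (stepB dp i).length = i + 1 ∧ ∀ v, v < i + 1 → MinD v ((stepB dp i).getD v 0) := by
  have attain_step : ∀ w, IsEdge w → w ≤ i → Reach (dp.getD (i - w) 0 + 1) i := by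
    intro w hwE hwi
    have hw1 := edge_pos hwE
    have hu : i - w < i := by omega
    have hr := (hmd (i - w) hu).1
    have := Reach.step hwE hr
    rwa [Nat.sub_add_cancel hwi] at this
  refine ⟨by simp [stepB, hlen], ?_⟩
  intro v hv
  by_cases hvi : v < i
  · rw [stepB, List.getD_append _ _ _ v (by omega)]
    exact hmd v hvi
  · have hvi' : v = i := by omega
    subst hvi'
    rw [stepB, List.getD_append_right _ _ _ v (by omega), hlen, Nat.sub_self]
    simp only [List.getD_cons_zero]
    constructor
    · -- the minimum is attained at some edge
      rcases minPowB_attain 9 (v + 1) 9 v dp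
          (minPowB 6 (v + 1) 6 v dp (dp.getD (v - 1) 0)) with h9 | ⟨k, hk, hv9⟩
      · rcases minPowB_attain 6 (v + 1) 6 v dp (dp.getD (v - 1) 0) with h6 | ⟨k, hk, hv6⟩
        · rw [h9, h6]
          have := attain_step 1 (Or.inl ⟨0, rfl⟩) hi
          simpa using this
        · rw [h9, hv6]
          exact attain_step (6 * 6 ^ k) (Or.inl ⟨k + 1, by ring⟩) hk
      · rw [hv9]
        exact attain_step (9 * 9 ^ k) (Or.inr ⟨k, by ring⟩) hk
    · -- and it is minimal
      intro k hk
      rcases reach_inv hk with ⟨_, hvz⟩ | ⟨w, j, u, hwE, rfl, hvu, hj⟩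
      · omega
      · have hw1 := edge_pos hwE
        have hwi : w ≤ v := by omega
        have hu : u < v := by omega
        have hdu : dp.getD u 0 ≤ j := (hmd u hu).2 j hj
        have hiu : v - w = u := by omega
        have hb9 : minPowB 9 (v + 1) 9 v dp
            (minPowB 6 (v + 1) 6 v dp (dp.getD (v - 1) 0)) ≤ dp.getD (v - w) 0 := by
          rcases hwE with ⟨k', rfl⟩ | ⟨k', rfl⟩
          · cases k' with
            | zero =>
              refine le_trans (minPowB_le_best _ _ _ _ _ _)
                (le_trans (minPowB_le_best _ _ _ _ _ _) ?_)
              simp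
            | succ k' =>
              refine le_trans (minPowB_le_best _ _ _ _ _ _) ?_
              have := minPowB_le 6 (v + 1) 6 v (by omega) (by omega) (by omega) dp
                (dp.getD (v - 1) 0) k'
                (by rw [show (6:Nat) * 6 ^ k' = 6 ^ (k' + 1) by ring]; exact hwi)
              rwa [show (6:Nat) * 6 ^ k' = 6 ^ (k' + 1) by ring] at this
          · have := minPowB_le 9 (v + 1) 9 v (by omega) (by omega) (by omega) dp
                (minPowB 6 (v + 1) 6 v dp (dp.getD (v - 1) 0)) k'
                (by rw [show (9:Nat) * 9 ^ k' = 9 ^ (k' + 1) by ring]; exact hwi)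
            rwa [show (9:Nat) * 9 ^ k' = 9 ^ (k' + 1) by ring] at this
        rw [hiu] at hb9
        omega

theorem B_minD (n : Nat) :
    ((List.range' 1 n).foldl stepB [0]).length = n + 1 ∧
    ∀ v, v ≤ n → MinD v (((List.range' 1 n).foldl stepB [0]).getD v 0) := by
  induction n with
  | zero =>
    refine ⟨by simp, ?_⟩
    intro v hv
    have hv0 : v = 0 := by omega
    subst hv0
    exact ⟨Reach.zero, fun k _ => Nat.zero_le _⟩
  | succ m ih =>
    obtain ⟨hl, hmd⟩ := ih
    have hconc : (List.range' 1 (m + 1)).foldl stepB [0]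
        = stepB ((List.range' 1 m).foldl stepB [0]) (m + 1) := by
      rw [List.range'_concat, List.foldl_append]
      simp [Nat.add_comm]
    obtain ⟨hl', hmd'⟩ := stepB_minD ((List.range' 1 m).foldl stepB [0]) (m + 1)
      (by omega) hl (fun v hv => hmd v (by omega))
    rw [hconc]
    exact ⟨hl', fun v hv => hmd' v (by omega)⟩

theorem ports_agree (N : Int) : search_heap N = search_heap_alt N := by
  have hA := A_minD N.toNat
  have hB := (B_minD N.toNat).2 N.toNat le_rfl
  have h := minD_unique hA hB
  simp only [search_heap, search_heap_alt]
  exact_mod_cast h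

-- ===== VERDICT (by name: the statement is the Claim_ definition above) =====
theorem search_heap_spec : Claim_equal_search_heap := by
  intro N _ _
  exact ports_agree N
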